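-- pv_equiv track=rewrite | github.com/jonnyell89/sudoku_app | app/sudoku.py | is_unit_valid
-- ===== SOURCE A (Python) =====
-- from typing import List, Tuple, Dict, Callable, Any, Iterable
--
-- def is_unit_valid(unit: List[int]) -> bool:
--
--     """
--     Checks that a single unit contains unique numbers only.
--
--     Parameters:
--
--         unit (List[int]): A list of integers representing a single row, column or subgrid.
--
--     Returns:
--
--         bool: True if the unit is valid, otherwise False.
--
--     """
--
--     nums = set()
--
--     for num in unit:
--
--         if num > 0:
--
--             if num in nums:
--
--                 return False
--
--             nums.add(num)
--
--     return True
-- ===== SOURCE B (Python) =====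
-- def is_unit_valid(unit):
--     nums = sorted(n for n in unit if n > 0)
--     return all(a < b for a, b in zip(nums, nums[1:]))
-- ===== Notes on version B (the rewrite author's own statement) =====
-- stated objective: alternative
-- what changed: Replaces A's single pass with a growing seen-set and early exit by a sort-then-scan strategy: sort the positive values and check every adjacent pair is strictly increasing, so duplicates show up as equal neighbours.
import Mathlib
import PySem

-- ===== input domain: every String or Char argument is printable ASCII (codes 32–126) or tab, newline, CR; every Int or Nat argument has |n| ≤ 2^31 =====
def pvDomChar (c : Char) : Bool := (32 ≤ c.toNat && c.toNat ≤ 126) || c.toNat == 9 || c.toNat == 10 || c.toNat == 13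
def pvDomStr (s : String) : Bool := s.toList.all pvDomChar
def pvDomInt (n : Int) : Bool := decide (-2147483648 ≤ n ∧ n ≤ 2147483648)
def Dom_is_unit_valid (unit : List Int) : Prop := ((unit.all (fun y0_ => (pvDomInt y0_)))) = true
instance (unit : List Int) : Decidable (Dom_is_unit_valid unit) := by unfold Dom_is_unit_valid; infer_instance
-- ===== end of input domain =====

-- B replaces A's single pass with a growing seen-set and early exit by a
-- sort-then-adjacent-scan: sort the positive values, duplicates become equal
-- neighbours; same results, no speed claim.

-- ===== PORT A =====
-- the 'for num in unit' loop carrying the growing set 'nums'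
def isUnitValidGo : List Int → PySem.Set Int → Bool
  | [], _ => true
  | num :: rest, nums =>
    if num > 0 then
      if PySem.Set.contains nums num then false
      else isUnitValidGo rest (PySem.Set.add nums num)
    else isUnitValidGo rest nums

def is_unit_valid (unit : List Int) : Bool :=
  isUnitValidGo unit PySem.Set.empty

-- ===== PORT B =====
-- all(a < b for a, b in zip(nums, nums[1:])) — scan of adjacent pairs
def adjStrictLt : List Int → Bool
  | a :: b :: t => decide (a < b) && adjStrictLt (b :: t)
  | _ => true

def is_unit_valid_alt (unit : List Int) : Bool :=
  let nums := PySem.List.sorted (unit.filter (fun n => decide (n > 0))) (fun x => x) false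
  adjStrictLt nums

-- ===== PRECONDITION & SPEC =====
def Spec_is_unit_valid (unit : List Int) (out : Bool) : Prop := out = is_unit_valid_alt unit
instance (unit : List Int) (out : Bool) : Decidable (Spec_is_unit_valid unit out) := by unfold Spec_is_unit_valid; infer_instance

-- ===== CLAIM (what is proved, stated in full; the proofs are below) =====
def Claim_equal_is_unit_valid : Prop := ∀ (unit : List Int), Dom_is_unit_valid unit → Spec_is_unit_valid unit (is_unit_valid unit)

-- ===== LEMMAS AND PROOFS =====

-- A's loop returns true iff the positive entries are pairwise distinct and none was already seen
lemma isUnitValidGo_iff (l : List Int) (s : PySem.Set Int) :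
    isUnitValidGo l s = true ↔
      (l.filter (fun n => decide (n > 0))).Nodup ∧
        ∀ x ∈ l.filter (fun n => decide (n > 0)), x ∉ s := by
  induction l generalizing s with
  | nil => simp [isUnitValidGo]
  | cons num rest ih =>
    by_cases h : num > 0
    · by_cases hc : num ∈ s
      · have hct : PySem.Set.contains s num = true := (PySem.Set.contains_iff s num).2 hc
        simp only [isUnitValidGo, if_pos h, hct, if_true, Bool.false_eq_true, false_iff]
        rintro ⟨_, hall⟩
        exact hall num (by simp [h]) hc
      · have hcf : PySem.Set.contains s num = false := by
          cases hcc : PySem.Set.contains s num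
          · rfl
          · exact absurd ((PySem.Set.contains_iff s num).1 hcc) hc
        have hstep : isUnitValidGo (num :: rest) s = isUnitValidGo rest (PySem.Set.add s num) := by
          simp only [isUnitValidGo, if_pos h, hcf, Bool.false_eq_true, if_false]
        rw [hstep, ih]
        simp only [List.filter_cons, decide_eq_true_eq, h, if_pos, List.nodup_cons,
          List.mem_cons, PySem.Set.mem_add]
        constructor
        · rintro ⟨hnd, hall⟩
          have hnum : num ∉ rest.filter (fun n => decide (n > 0)) :=
            fun hm => (hall num hm) (Or.inr rfl)
          refine ⟨⟨hnum, hnd⟩, ?_⟩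
          rintro x (rfl | hx)
          · exact hc
          · intro hxs
            exact hall x hx (Or.inl hxs)
        · rintro ⟨⟨hnum, hnd⟩, hall⟩
          refine ⟨hnd, ?_⟩
          rintro x hx (hxs | rfl)
          · exact hall x (Or.inr hx) hxs
          · exact hnum hx
    · simp [isUnitValidGo, h, ih]

-- B's adjacent scan decides strict chaining
lemma adjStrictLt_iff_chain (l : List Int) :
    adjStrictLt l = true ↔ l.IsChain (· < ·) := by
  induction l with
  | nil => simp [adjStrictLt]
  | cons a t ih =>
    cases t with
    | nil => simp [adjStrictLt]
    | cons b r =>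
      simp only [adjStrictLt, Bool.and_eq_true, decide_eq_true_eq, List.isChain_cons, ih,
        List.head?_cons, Option.mem_def, Option.some.injEq, forall_eq']

-- on a ≤-sorted list, adjacent strictness is exactly Nodup
lemma chain_lt_iff_nodup_of_pairwise_le (l : List Int) (hle : l.Pairwise (· ≤ ·)) :
    l.IsChain (· < ·) ↔ l.Nodup := by
  rw [List.isChain_iff_pairwise]
  constructor
  · intro hlt
    exact hlt.imp (fun h => ne_of_lt h)
  · intro hnd
    have := List.Pairwise.and hle hnd
    exact this.imp (fun ⟨h1, h2⟩ => lt_of_le_of_ne h1 h2)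

-- ===== VERDICT (by name: the statement is the Claim_ definition above) =====
theorem is_unit_valid_spec : Claim_equal_is_unit_valid := by
  intro unit _
  unfold Spec_is_unit_valid is_unit_valid is_unit_valid_alt
  set nums := unit.filter (fun n => decide (n > 0)) with hnums
  have hperm : (PySem.List.sorted nums (fun x => x) false).Perm nums :=
    PySem.List.sorted_perm ..
  have hle : (PySem.List.sorted nums (fun x => x) false).Pairwise (· ≤ ·) :=
    PySem.List.sorted_pairwise ..
  rw [Bool.eq_iff_iff, isUnitValidGo_iff, adjStrictLt_iff_chain,
    chain_lt_iff_nodup_of_pairwise_le _ hle, hperm.nodup_iff]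
  simp only [PySem.Set.empty, List.not_mem_nil, not_false_iff, implies_true, and_true]
  exact Iff.rfl
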